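-- pv_equiv track=rewrite | github.com/choichanhyeok/algorithm_boj | test/line_2.py | solution
-- ===== SOURCE A (Python) =====
-- from typing import List
--
-- def solution(k: int, dic: List[str], chat: str) -> str:
--     answer = ''
--
--     #TODO 1: chat을 split을 통해 단어별로 구성된 리스트로 만들어준다.
--     chat_word_list = chat.split(' ')
--
--     #TODO 2: 필터링 구분
--     for word in chat_word_list:
--         if word in dic:    # case1. 제외 단어랑 완전히 같을 때, *으로 대체한다
--             answer += '*' * len(word)
--         elif '.' in word:
--             for exce in dic:
--                 if word[:2] in exce:
--                     answer += '*' * len(word)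
--                     break
--
--
--
--
--
--
--
--     return answer
-- ===== SOURCE B (Python) =====
-- from typing import List
--
--
-- def _grams(s: str) -> List[str]:
--     # all substrings of s of length 1 and 2
--     return list(s) + [a + b for a, b in zip(s, s[1:])]
--
--
-- def solution(k: int, dic: List[str], chat: str) -> str:
--     full = set(dic)
--     S = set()
--     for e in dic:
--         S.update(_grams(e))
--     answer = ''
--     for word in chat.split(' '):
--         if word in full:
--             answer += '*' * len(word)
--         elif '.' in word and word[:2] in S:
--             answer += '*' * len(word)
--     return answer
-- ===== Notes on version B (the rewrite author's own statement) =====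
-- stated objective: alternative
-- what changed: Replaces the per-word inner scan over dic (list membership plus 'any' substring test) with a precomputed set of dic entries and a precomputed set of all length-1/2 substrings of dic entries, so each word is decided by two set lookups instead of scanning dic.
import Mathlib
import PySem

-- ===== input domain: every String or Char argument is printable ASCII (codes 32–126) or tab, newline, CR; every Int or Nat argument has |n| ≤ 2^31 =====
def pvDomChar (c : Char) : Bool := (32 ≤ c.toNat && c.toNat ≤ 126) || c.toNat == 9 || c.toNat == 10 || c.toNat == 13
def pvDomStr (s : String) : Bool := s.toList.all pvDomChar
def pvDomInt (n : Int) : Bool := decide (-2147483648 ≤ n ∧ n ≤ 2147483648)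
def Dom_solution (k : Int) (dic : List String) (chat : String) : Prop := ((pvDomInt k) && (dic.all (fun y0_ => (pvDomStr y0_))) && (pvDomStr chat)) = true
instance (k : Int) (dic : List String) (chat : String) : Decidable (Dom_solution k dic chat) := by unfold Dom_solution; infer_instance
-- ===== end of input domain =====

-- B precomputes a set of dic entries and a set of all length-1/2 substrings of dic entries,
-- so each word is decided by set lookups instead of A's per-word inner scans over dic (objective: alternative).

-- ===== PORT A =====
-- A, step for step, on code-point lists (PySem.Chars are the exact Str semantics):
-- split on ' ', then per word: full match against dic, else the '.' branch with the
-- inner 'for exce in dic: if word[:2] in exce: …; break' scan (ported as List.any).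
def solution (k : Int) (dic : List String) (chat : String) : String :=
  let chatWordList := PySem.Chars.splitOn chat.toList [' ']
  let answer := chatWordList.foldl (fun answer word =>
    if (dic.map String.toList).contains word then
      answer ++ List.replicate word.length '*'          -- '*' * len(word), len(word) ≥ 0
    else if PySem.Chars.isIn ['.'] word then
      if dic.any (fun exce =>
          PySem.Chars.isIn (PySem.Chars.slice word none (some 2)) exce.toList) then
        answer ++ List.replicate word.length '*'
      else answer
    else answer) []
  String.ofList answer

-- ===== PORT B =====
-- all substrings of length 1 and 2 of s (Source B's _grams: list(s) + zip of adjacent pairs)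
def grams (s : List Char) : List (List Char) :=
  s.map (fun a => [a]) ++ (s.zip (PySem.List.slice s (some 1) none)).map (fun p => [p.1, p.2])

def solution_alt (k : Int) (dic : List String) (chat : String) : String :=
  let full : PySem.Set (List Char) := PySem.Set.ofList (dic.map String.toList)
  let S : PySem.Set (List Char) :=
    dic.foldl (fun s e => PySem.Set.update s (grams e.toList)) PySem.Set.empty
  let answer := (PySem.Chars.splitOn chat.toList [' ']).foldl (fun answer word =>
    if full.contains word then
      answer ++ List.replicate word.length '*'
    else if PySem.Chars.isIn ['.'] word
        && S.contains (PySem.Chars.slice word none (some 2)) then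
      answer ++ List.replicate word.length '*'
    else answer) []
  String.ofList answer

-- ===== PRECONDITION & SPEC =====
def Spec_solution (k : Int) (dic : List String) (chat : String) (out : String) : Prop := out = solution_alt k dic chat
instance (k : Int) (dic : List String) (chat : String) (out : String) : Decidable (Spec_solution k dic chat out) := by unfold Spec_solution; infer_instance

-- ===== CLAIM (what is proved, stated in full; the proofs are below) =====
def Claim_equal_solution : Prop := ∀ (k : Int) (dic : List String) (chat : String), Dom_solution k dic chat → Spec_solution k dic chat (solution k dic chat)

-- ===== LEMMAS AND PROOFS =====

-- membership in grams (a :: b :: r) peels off the two substrings starting at a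
theorem mem_grams_cons_cons (a b : Char) (r t : List Char) :
    t ∈ grams (a :: b :: r) ↔ t = [a] ∨ t = [a, b] ∨ t ∈ grams (b :: r) := by
  simp [grams, PySem.List.slice_from_one]
  constructor
  · rintro (h | h | h | h | h)
    exacts [Or.inl h, Or.inr (Or.inr (Or.inl h)), Or.inr (Or.inr (Or.inr (Or.inl h))),
      Or.inr (Or.inl h), Or.inr (Or.inr (Or.inr (Or.inr h)))]
  · rintro (h | h | h | h | h)
    exacts [Or.inl h, Or.inr (Or.inr (Or.inr (Or.inl h))), Or.inr (Or.inl h),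
      Or.inr (Or.inr (Or.inl h)), Or.inr (Or.inr (Or.inr (Or.inr h)))]

-- a list of length 1 or 2 is in grams e iff it is an infix of e
theorem mem_grams_iff : ∀ (t e : List Char), t.length = 1 ∨ t.length = 2 →
    (t ∈ grams e ↔ t <:+: e)
  | t, [], ht => by
    simp only [grams, List.map_nil, List.zip_nil_left, List.nil_append, List.not_mem_nil,
      false_iff, List.infix_nil]
    rintro rfl
    simp at ht
  | t, [a], ht => by
    have hg : grams [a] = [[a]] := by simp [grams, PySem.List.slice_from_one]
    rw [hg]
    simp only [List.mem_cons, List.not_mem_nil, or_false]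
    constructor
    · rintro rfl; exact List.infix_refl _
    · intro h
      have h1 := h.sublist.length_le
      have h2 : t.length = 1 := by simp at h1; omega
      exact h.sublist.eq_of_length (by simpa using h2)
  | t, a :: b :: r, ht => by
    obtain ⟨x, rfl⟩ | ⟨x, y, rfl⟩ : (∃ x, t = [x]) ∨ (∃ x y, t = [x, y]) := by
      match t, ht with
      | [x], _ => exact Or.inl ⟨x, rfl⟩
      | [x, y], _ => exact Or.inr ⟨x, y, rfl⟩
    all_goals
      rw [mem_grams_cons_cons, List.infix_cons_iff, mem_grams_iff _ (b :: r) ht]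
      simp [List.cons_prefix_cons]

-- membership in B's substring index S
theorem mem_foldl_update_grams (dic : List String) (s : PySem.Set (List Char)) (t : List Char) :
    t ∈ dic.foldl (fun s e => PySem.Set.update s (grams e.toList)) s ↔
      t ∈ s ∨ ∃ e ∈ dic, t ∈ grams e.toList := by
  induction dic generalizing s with
  | nil => simp
  | cons d dic ih =>
    simp only [List.foldl_cons, ih, PySem.Set.mem_update, List.mem_cons]
    constructor
    · rintro ((h | h) | ⟨e, he, ht⟩)
      · exact Or.inl h
      · exact Or.inr ⟨d, Or.inl rfl, h⟩
      · exact Or.inr ⟨e, Or.inr he, ht⟩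
    · rintro (h | ⟨e, (rfl | he), ht⟩)
      · exact Or.inl (Or.inl h)
      · exact Or.inl (Or.inr ht)
      · exact Or.inr ⟨e, he, ht⟩

-- the two per-word update functions agree on every word
theorem step_eq (dic : List String) (answer word : List Char) :
    (if (dic.map String.toList).contains word then
      answer ++ List.replicate word.length '*'
    else if PySem.Chars.isIn ['.'] word then
      if dic.any (fun exce =>
          PySem.Chars.isIn (PySem.Chars.slice word none (some 2)) exce.toList) then
        answer ++ List.replicate word.length '*'
      else answer
    else answer) =
    (if (PySem.Set.ofList (dic.map String.toList)).contains word then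
      answer ++ List.replicate word.length '*'
    else if PySem.Chars.isIn ['.'] word
        && (dic.foldl (fun s e => PySem.Set.update s (grams e.toList))
              PySem.Set.empty).contains (PySem.Chars.slice word none (some 2)) then
      answer ++ List.replicate word.length '*'
    else answer) := by
  have hfull : (PySem.Set.ofList (dic.map String.toList)).contains word
      = (dic.map String.toList).contains word := by
    simp [PySem.Set.mem_ofList]
  rw [hfull]
  by_cases hmem : (dic.map String.toList).contains word = true
  · rw [hmem]
    rfl
  · rw [Bool.not_eq_true] at hmem
    rw [hmem]
    by_cases hdot : PySem.Chars.isIn ['.'] word = true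
    · -- word contains '.', so word is nonempty and word[:2] has length 1 or 2
      have hword : word ≠ [] := by
        intro h
        subst h
        have := (PySem.Chars.isIn_iff_infix _ _).mp hdot
        rw [List.infix_nil] at this
        simp at this
      have hslice : PySem.Chars.slice word none (some 2) = word.take 2 := by
        rw [PySem.Chars.slice_eq_listSlice,
          PySem.List.slice_to (xs := word) (b := (2 : Int)) (by norm_num)]
        rfl
      rw [hslice]
      have hlen : (word.take 2).length = 1 ∨ (word.take 2).length = 2 := by
        cases word with
        | nil => exact absurd rfl hword
        | cons a w => cases w <;> simp
      have hS : (dic.foldl (fun s e => PySem.Set.update s (grams e.toList))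
            PySem.Set.empty).contains (word.take 2)
          = dic.any (fun exce => PySem.Chars.isIn (word.take 2) exce.toList) := by
        rw [PySem.Set.contains_eq_decide]
        by_cases h : dic.any (fun exce => PySem.Chars.isIn (word.take 2) exce.toList) = true
        · rw [h]
          simp only [decide_eq_true_iff, mem_foldl_update_grams]
          simp only [List.any_eq_true, PySem.Chars.isIn_iff_infix] at h
          obtain ⟨e, he, hte⟩ := h
          exact Or.inr ⟨e, he, (mem_grams_iff _ _ hlen).mpr hte⟩
        · rw [Bool.not_eq_true] at h
          rw [h]
          simp only [decide_eq_false_iff_not, mem_foldl_update_grams]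
          rw [List.any_eq_false] at h
          rintro (hc | ⟨e, he, hte⟩)
          · simp [PySem.Set.empty] at hc
          · have := h e he
            rw [Bool.not_eq_true, PySem.Chars.isIn_eq_false_iff] at this
            exact this ((mem_grams_iff _ _ hlen).mp hte)
      rw [hdot, hS, Bool.true_and]
      rfl
    · rw [Bool.not_eq_true] at hdot
      rw [hdot]
      simp

-- ===== VERDICT (by name: the statement is the Claim_ definition above) =====
theorem solution_spec : Claim_equal_solution := by
  intro k dic chat _
  unfold Spec_solution solution solution_alt
  simp only []
  congr 1
  exact PySem.List.foldl_congr_mem _ _ _ _ (fun acc w _ => step_eq dic acc w)
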